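-- pv_equiv track=rewrite | github.com/Samk104/DSA-Problems | Company-Specific/Amazon/similarTextSubstringCount.py | similarTextSubstringCount
-- ===== SOURCE A (Python) =====
-- def similarTextSubstringCount(key: str, text: str) -> int:
--     res = 0
--     key_len = len(key)
--
--     for l in range(len(text) - key_len + 1):
--         word = text[l:l+key_len]
--
--         if key == word:
--             res += 1
--             continue
--
--         # Swap
--         word_list = list(word)
--         for i in range(key_len - 1):
--             word_list[i], word_list[i+1] = word_list[i+1], word_list[i]
--             if ''.join(word_list) == key:
--                 res += 1
--                 break
--             word_list[i], word_list[i+1] = word_list[i+1], word_list[i]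
--
--     return res
-- ===== SOURCE B (Python) =====
-- def similarTextSubstringCount(key: str, text: str) -> int:
--     m = len(key)
--     res = 0
--     for l in range(len(text) - m + 1):
--         w = text[l:l+m]
--         diffs = [i for i in range(m) if w[i] != key[i]]
--         if not diffs:
--             res += 1
--         elif (len(diffs) == 2 and diffs[1] == diffs[0] + 1
--               and w[diffs[0]] == key[diffs[1]] and w[diffs[1]] == key[diffs[0]]):
--             res += 1
--     return res
-- ===== Notes on version B (the rewrite author's own statement) =====
-- stated objective: faster
-- what changed: Instead of physically trying every adjacent swap of each window and re-joining to compare with the key (O(m) swaps x O(m) comparison per window), B scans each window once, collects the mismatch positions against the key, and counts the window iff there are no mismatches or exactly two adjacent mismatch positions whose characters are crosswise equal.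
import Mathlib
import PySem

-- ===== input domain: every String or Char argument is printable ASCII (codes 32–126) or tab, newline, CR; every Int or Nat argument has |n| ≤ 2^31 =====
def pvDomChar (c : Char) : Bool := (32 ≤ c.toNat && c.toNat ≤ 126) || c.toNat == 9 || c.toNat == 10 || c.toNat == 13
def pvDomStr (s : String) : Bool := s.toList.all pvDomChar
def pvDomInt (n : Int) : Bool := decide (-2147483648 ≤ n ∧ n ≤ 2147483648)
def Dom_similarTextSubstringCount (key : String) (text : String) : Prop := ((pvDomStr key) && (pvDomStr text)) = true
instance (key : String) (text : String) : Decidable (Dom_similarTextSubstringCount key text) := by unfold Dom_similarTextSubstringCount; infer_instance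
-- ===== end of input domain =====

-- B replaces A's try-every-adjacent-swap-and-rejoin inner loop by a single mismatch scan per window.

-- ===== PORT A =====
-- word_list[i], word_list[i+1] = word_list[i+1], word_list[i]  (both reads happen before both writes)
def pvSwap (wl : List Char) (i : Int) : List Char :=
  PySem.List.pySetD (PySem.List.pySetD wl i (PySem.List.pyGetD wl (i + 1) ' ')) (i + 1)
    (PySem.List.pyGetD wl i ' ')

-- the inner 'for i in range(key_len - 1)' loop with its break, swapping back on failure
def pvInnerA (k : List Char) : List Char → List Int → Bool
  | _, [] => false
  | wl, i :: is =>
    let wl1 := pvSwap wl i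
    if wl1 = k then true else pvInnerA k (pvSwap wl1 i) is

def similarTextSubstringCount (key : String) (text : String) : Int :=
  let k := key.toList
  let t := text.toList
  let keyLen : Int := k.length
  (PySem.List.pyRange 0 ((t.length : Int) - keyLen + 1) 1).foldl
    (fun res l =>
      let word := PySem.List.slice t (some l) (some (l + keyLen))
      if k = word then res + 1
      else if pvInnerA k word (PySem.List.pyRange 0 (keyLen - 1) 1) then res + 1 else res)
    0

-- ===== PORT B =====
def similarTextSubstringCount_alt (key : String) (text : String) : Int :=
  let k := key.toList
  let t := text.toList
  let m : Int := k.length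
  (PySem.List.pyRange 0 ((t.length : Int) - m + 1) 1).foldl
    (fun res l =>
      let w := PySem.List.slice t (some l) (some (l + m))
      let diffs := (PySem.List.pyRange 0 m 1).filter
        (fun i => PySem.List.pyGetD w i ' ' != PySem.List.pyGetD k i ' ')
      if diffs = [] then res + 1
      else if diffs.length = 2 ∧
              PySem.List.pyGetD diffs 1 0 = PySem.List.pyGetD diffs 0 0 + 1 ∧
              PySem.List.pyGetD w (PySem.List.pyGetD diffs 0 0) ' ' = PySem.List.pyGetD k (PySem.List.pyGetD diffs 1 0) ' ' ∧
              PySem.List.pyGetD w (PySem.List.pyGetD diffs 1 0) ' ' = PySem.List.pyGetD k (PySem.List.pyGetD diffs 0 0) ' '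
        then res + 1 else res)
    0

-- ===== PRECONDITION & SPEC =====
def Spec_similarTextSubstringCount (key : String) (text : String) (out : Int) : Prop := out = similarTextSubstringCount_alt key text
instance (key : String) (text : String) (out : Int) : Decidable (Spec_similarTextSubstringCount key text out) := by unfold Spec_similarTextSubstringCount; infer_instance

-- ===== CLAIM (what is proved, stated in full; the proofs are below) =====
def Claim_equal_similarTextSubstringCount : Prop := ∀ (key : String) (text : String), Dom_similarTextSubstringCount key text → Spec_similarTextSubstringCount key text (similarTextSubstringCount key text)

-- ===== LEMMAS AND PROOFS =====

-- Nat form of pvSwap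
def pvNatSwap (wl : List Char) (i : Nat) : List Char :=
  (wl.set i (wl.getD (i + 1) ' ')).set (i + 1) (wl.getD i ' ')

theorem pvSwap_natCast (wl : List Char) (i : Nat) :
    pvSwap wl (i : Int) = pvNatSwap wl i := by
  unfold pvSwap pvNatSwap
  have h1 : ((i : Int) + 1) = ((i + 1 : Nat) : Int) := by push_cast; ring
  rw [h1, PySem.List.pyGetD_natCast, PySem.List.pyGetD_natCast,
    PySem.List.pySetD_natCast, PySem.List.pySetD_natCast]

theorem pvNatSwap_length (wl : List Char) (i : Nat) : (pvNatSwap wl i).length = wl.length := by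
  simp [pvNatSwap]

theorem pvNatSwap_getD (wl : List Char) (i j : Nat) (h : i + 1 < wl.length) :
    (pvNatSwap wl i).getD j ' ' =
      if j = i + 1 then wl.getD i ' ' else if j = i then wl.getD (i + 1) ' ' else wl.getD j ' ' := by
  unfold pvNatSwap
  by_cases hj : j < wl.length
  · simp only [List.getD_eq_getElem?_getD]
    rw [List.getElem?_set, List.getElem?_set]
    simp only [List.length_set]
    split_ifs with h1 h2 h3 h4 h5 <;> first
      | rfl
      | omega
  · have hj1 : j ≠ i + 1 := by omega
    have hj2 : j ≠ i := by omega
    rw [if_neg hj1, if_neg hj2,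
      List.getD_eq_default _ _ (by simp only [List.length_set]; omega),
      List.getD_eq_default _ _ (by omega)]

theorem pvEqOfGetD (a b : List Char) (hl : a.length = b.length)
    (h : ∀ j, a.getD j ' ' = b.getD j ' ') : a = b := by
  apply List.ext_getElem hl
  intro j h1 h2
  have := h j
  rwa [List.getD_eq_getElem _ _ h1, List.getD_eq_getElem _ _ h2] at this

theorem pvNatSwap_invol (wl : List Char) (i : Nat) (h : i + 1 < wl.length) :
    pvNatSwap (pvNatSwap wl i) i = wl := by
  apply pvEqOfGetD
  · rw [pvNatSwap_length, pvNatSwap_length]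
  · intro j
    have h' : i + 1 < (pvNatSwap wl i).length := by rw [pvNatSwap_length]; exact h
    rw [pvNatSwap_getD _ _ _ h']
    split_ifs with h1 h2
    · rw [pvNatSwap_getD _ _ _ h, if_neg (by omega), if_pos rfl, h1]
    · rw [pvNatSwap_getD _ _ _ h, if_pos rfl, h2]
    · rw [pvNatSwap_getD _ _ _ h, if_neg h1, if_neg h2]

theorem pvInnerA_eq_any (k : List Char) (is : List Int) (wl : List Char)
    (h : ∀ i ∈ is, 0 ≤ i ∧ i.toNat + 1 < wl.length) :
    (pvInnerA k wl is = true ↔ ∃ i ∈ is, pvSwap wl i = k) := by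
  induction is with
  | nil => simp [pvInnerA]
  | cons i is ih =>
    obtain ⟨hi0, hi1⟩ := h i (List.mem_cons_self ..)
    have hcast : (i.toNat : Int) = i := Int.toNat_of_nonneg hi0
    have hswap : pvSwap (pvSwap wl i) i = wl := by
      rw [← hcast, pvSwap_natCast, pvSwap_natCast, pvNatSwap_invol _ _ hi1]
    simp only [pvInnerA]
    by_cases he : pvSwap wl i = k
    · simp [he]
    · rw [if_neg he, hswap, ih (fun j hj => h j (List.mem_cons_of_mem _ hj))]
      constructor
      · rintro ⟨j, hj, hje⟩; exact ⟨j, List.mem_cons_of_mem _ hj, hje⟩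
      · rintro ⟨j, hj, hje⟩
        rcases List.mem_cons.mp hj with rfl | hj
        · exact absurd hje he
        · exact ⟨j, hj, hje⟩

theorem pvNatSwap_eq_iff (k wl : List Char) (i : Nat) (hlen : wl.length = k.length)
    (h : i + 1 < k.length) :
    (pvNatSwap wl i = k ↔
      (wl.getD i ' ' = k.getD (i + 1) ' ' ∧ wl.getD (i + 1) ' ' = k.getD i ' ' ∧
        ∀ j, j ≠ i → j ≠ i + 1 → wl.getD j ' ' = k.getD j ' ')) := by
  have h' : i + 1 < wl.length := by omega
  constructor
  · intro he
    refine ⟨?_, ?_, ?_⟩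
    · have h0 : (pvNatSwap wl i).getD (i + 1) ' ' = k.getD (i + 1) ' ' := by rw [he]
      rwa [pvNatSwap_getD _ _ _ h', if_pos rfl] at h0
    · have h0 : (pvNatSwap wl i).getD i ' ' = k.getD i ' ' := by rw [he]
      rwa [pvNatSwap_getD _ _ _ h', if_neg (by omega), if_pos rfl] at h0
    · intro j hj1 hj2
      have h0 : (pvNatSwap wl i).getD j ' ' = k.getD j ' ' := by rw [he]
      rwa [pvNatSwap_getD _ _ _ h', if_neg hj2, if_neg hj1] at h0
  · rintro ⟨h1, h2, h3⟩
    apply pvEqOfGetD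
    · rw [pvNatSwap_length]; exact hlen
    · intro j
      rw [pvNatSwap_getD _ _ _ h']
      split_ifs with hj1 hj2
      · rw [h1, hj1]
      · rw [h2, hj2]
      · exact h3 j hj2 hj1

-- the Nat-level mismatch list
def pvDiffs (k w : List Char) : List Nat :=
  (List.range k.length).filter (fun n => w.getD n ' ' != k.getD n ' ')

theorem pvMem_diffs (k w : List Char) (j : Nat) :
    j ∈ pvDiffs k w ↔ j < k.length ∧ w.getD j ' ' ≠ k.getD j ' ' := by
  simp [pvDiffs, List.mem_filter]

theorem pvDiffs_nil_iff (k w : List Char) (hlen : w.length = k.length) :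
    pvDiffs k w = [] ↔ w = k := by
  constructor
  · intro he
    apply pvEqOfGetD _ _ hlen
    intro j
    by_cases hj : j < k.length
    · by_contra hne
      have : j ∈ pvDiffs k w := (pvMem_diffs k w j).mpr ⟨hj, hne⟩
      simp [he] at this
    · rw [List.getD_eq_default _ _ (by omega), List.getD_eq_default _ _ (by omega)]
  · intro he
    subst he
    simp [pvDiffs, List.filter_eq_nil_iff]

-- filter of range with a two-point predicate
theorem pvFilter_range_pair (m i : Nat) (p : Nat → Bool) (h : i + 1 < m)
    (hp : ∀ j, j < m → (p j = true ↔ (j = i ∨ j = i + 1))) :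
    (List.range m).filter p = [i, i + 1] := by
  obtain ⟨r, rfl⟩ : ∃ r, m = (i + 2) + r := ⟨m - (i + 2), by omega⟩
  rw [List.range_add, List.filter_append]
  have e1 : List.range (i + 2) = (List.range i ++ [i]) ++ [i + 1] := by
    rw [← List.range_succ, ← List.range_succ]
  rw [e1, List.filter_append, List.filter_append]
  have f0 : (List.range i).filter p = [] := by
    rw [List.filter_eq_nil_iff]
    intro a ha
    have ha' := List.mem_range.mp ha
    intro hpa
    rcases (hp a (by omega)).mp hpa with rfl | rfl <;> omega
  have f1 : [i].filter p = [i] := by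
    simp [List.filter, (hp i (by omega)).mpr (Or.inl rfl)]
  have f2 : [i + 1].filter p = [i + 1] := by
    simp [List.filter, (hp (i + 1) (by omega)).mpr (Or.inr rfl)]
  have f3 : ((List.range r).map (i + 2 + ·)).filter p = [] := by
    rw [List.filter_eq_nil_iff]
    intro a ha
    obtain ⟨b, hb, rfl⟩ := List.mem_map.mp ha
    intro hpa
    rcases (hp _ (by have := List.mem_range.mp hb; omega)).mp hpa with h' | h' <;> omega
  rw [f0, f1, f2, f3]
  simp

-- the B-side window condition, at the Nat level, characterizes "some adjacent swap gives k"
theorem pvCond_iff_swap (k w : List Char) (hlen : w.length = k.length) (hne : w ≠ k) :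
    ((pvDiffs k w).length = 2 ∧
      (pvDiffs k w).getD 1 0 = (pvDiffs k w).getD 0 0 + 1 ∧
      w.getD ((pvDiffs k w).getD 0 0) ' ' = k.getD ((pvDiffs k w).getD 1 0) ' ' ∧
      w.getD ((pvDiffs k w).getD 1 0) ' ' = k.getD ((pvDiffs k w).getD 0 0) ' ') ↔
    (∃ i : Nat, i + 1 < k.length ∧ pvNatSwap w i = k) := by
  constructor
  · rintro ⟨hl2, hadj, hc1, hc2⟩
    obtain ⟨a, b, hab⟩ := List.length_eq_two.mp hl2
    rw [hab] at hadj hc1 hc2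
    simp only [List.getD_cons_zero, List.getD_cons_succ] at hadj hc1 hc2
    subst hadj
    have hmema : a ∈ pvDiffs k w := by rw [hab]; simp
    have hmemb : a + 1 ∈ pvDiffs k w := by rw [hab]; simp
    have ha := (pvMem_diffs k w a).mp hmema
    have hb := (pvMem_diffs k w (a + 1)).mp hmemb
    refine ⟨a, hb.1, ?_⟩
    rw [pvNatSwap_eq_iff k w a hlen hb.1]
    refine ⟨hc1, hc2, ?_⟩
    intro j hj1 hj2
    by_cases hjm : j < k.length
    · by_contra hne'
      have : j ∈ pvDiffs k w := (pvMem_diffs k w j).mpr ⟨hjm, hne'⟩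
      rw [hab] at this
      simp at this
      rcases this with h' | h' <;> omega
    · rw [List.getD_eq_default _ _ (by omega), List.getD_eq_default _ _ (by omega)]
  · rintro ⟨i, hi, hsw⟩
    rw [pvNatSwap_eq_iff k w i hlen hi] at hsw
    obtain ⟨h1, h2, h3⟩ := hsw
    -- both i and i+1 must be mismatches
    have hmi : w.getD i ' ' ≠ k.getD i ' ' := by
      intro he
      have hki : k.getD i ' ' = k.getD (i + 1) ' ' := by rw [← he, h1]
      apply hne
      apply pvEqOfGetD _ _ hlen
      intro j
      by_cases hj1 : j = i
      · rw [hj1, he]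
      · by_cases hj2 : j = i + 1
        · rw [hj2, h2, hki]
        · exact h3 j hj1 hj2
    have hmi1 : w.getD (i + 1) ' ' ≠ k.getD (i + 1) ' ' := by
      intro he
      have hki : k.getD i ' ' = k.getD (i + 1) ' ' := by rw [← he, h2]
      apply hmi
      rw [h1, hki]
    have hD : pvDiffs k w = [i, i + 1] := by
      apply pvFilter_range_pair _ _ _ hi
      intro j hj
      simp only [bne_iff_ne, ne_eq, decide_eq_true_eq]
      constructor
      · intro hpj
        by_contra hcon
        push_neg at hcon
        exact hpj (h3 j hcon.1 hcon.2)
      · rintro (rfl | rfl)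
        · exact hmi
        · exact hmi1
    rw [hD]
    exact ⟨rfl, rfl, h1, h2⟩

-- explicit Nat→Int list cast
def pvCastL (l : List Nat) : List Int := List.map (Nat.cast : Nat → Int) l

theorem pvCastL_eq_nil (l : List Nat) : pvCastL l = [] ↔ l = [] := by
  simp [pvCastL]

theorem pvCastL_length (l : List Nat) : (pvCastL l).length = l.length := by
  simp [pvCastL]

theorem pvCastL_getD (l : List Nat) (j : Nat) : (pvCastL l).getD j 0 = ((l.getD j 0 : Nat) : Int) := by
  rcases Nat.lt_or_ge j l.length with hj | hj
  · rw [List.getD_eq_getElem _ _ (by rw [pvCastL_length]; exact hj), List.getD_eq_getElem _ _ hj]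
    simp [pvCastL]
  · rw [List.getD_eq_default _ _ (by rw [pvCastL_length]; exact hj), List.getD_eq_default _ _ hj]
    simp

-- transfer of B's Int-level diffs to the Nat level
theorem pvDiffsInt_eq (k w : List Char) :
    (PySem.List.pyRange 0 (k.length : Int) 1).filter
        (fun i => PySem.List.pyGetD w i ' ' != PySem.List.pyGetD k i ' ')
      = pvCastL (pvDiffs k w) := by
  have h1 : PySem.List.pyRange 0 (k.length : Int) 1 = pvCastL (List.range k.length) := by
    rw [PySem.List.pyRange_one]
    unfold pvCastL
    simp
  rw [h1]
  unfold pvCastL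
  rw [List.filter_map]
  unfold pvDiffs
  congr 1
  apply List.filter_congr
  intro n _
  simp [PySem.List.pyGetD_natCast]

-- per-window equivalence of the two loop bodies
theorem pvWindow_eq (k w : List Char) (hlen : w.length = k.length) (res : Int) :
    (if k = w then res + 1
     else if pvInnerA k w (PySem.List.pyRange 0 ((k.length : Int) - 1) 1) then res + 1 else res) =
    (let diffs := (PySem.List.pyRange 0 (k.length : Int) 1).filter
        (fun i => PySem.List.pyGetD w i ' ' != PySem.List.pyGetD k i ' ')
     if diffs = [] then res + 1
     else if diffs.length = 2 ∧
              PySem.List.pyGetD diffs 1 0 = PySem.List.pyGetD diffs 0 0 + 1 ∧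
              PySem.List.pyGetD w (PySem.List.pyGetD diffs 0 0) ' ' = PySem.List.pyGetD k (PySem.List.pyGetD diffs 1 0) ' ' ∧
              PySem.List.pyGetD w (PySem.List.pyGetD diffs 1 0) ' ' = PySem.List.pyGetD k (PySem.List.pyGetD diffs 0 0) ' '
        then res + 1 else res) := by
  simp only [pvDiffsInt_eq]
  by_cases heq : w = k
  · have hnil : pvCastL (pvDiffs k w) = [] := by
      rw [pvCastL_eq_nil, pvDiffs_nil_iff k w hlen]
      exact heq
    rw [if_pos (show k = w from heq.symm), if_pos hnil]
  · have hnil : ¬ (pvCastL (pvDiffs k w) = []) := by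
      rw [pvCastL_eq_nil, pvDiffs_nil_iff k w hlen]
      exact heq
    rw [if_neg (show ¬ k = w from fun h => heq h.symm), if_neg hnil]
    -- A's inner loop ↔ existence of an adjacent swap
    have hA : pvInnerA k w (PySem.List.pyRange 0 ((k.length : Int) - 1) 1) = true ↔
        ∃ i : Nat, i + 1 < k.length ∧ pvNatSwap w i = k := by
      rw [pvInnerA_eq_any]
      · constructor
        · rintro ⟨i, hi, he⟩
          have hi' := (PySem.List.mem_pyRange_one).mp hi
          refine ⟨i.toNat, by omega, ?_⟩
          rw [← pvSwap_natCast, Int.toNat_of_nonneg hi'.1]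
          exact he
        · rintro ⟨n, hn, he⟩
          refine ⟨(n : Int), (PySem.List.mem_pyRange_one).mpr ⟨by omega, by omega⟩, ?_⟩
          rw [pvSwap_natCast]
          exact he
      · intro i hi
        have hi' := (PySem.List.mem_pyRange_one).mp hi
        exact ⟨hi'.1, by omega⟩
    have h0 : PySem.List.pyGetD (pvCastL (pvDiffs k w)) 0 0
        = (((pvDiffs k w).getD 0 0 : Nat) : Int) := by
      rw [PySem.List.pyGetD_zero]
      exact pvCastL_getD (pvDiffs k w) 0
    have h1 : PySem.List.pyGetD (pvCastL (pvDiffs k w)) 1 0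
        = (((pvDiffs k w).getD 1 0 : Nat) : Int) := by
      simp only [PySem.List.pyGetD_ofNat']
      exact pvCastL_getD (pvDiffs k w) 1
    have hB : ((pvCastL (pvDiffs k w)).length = 2 ∧
          PySem.List.pyGetD (pvCastL (pvDiffs k w)) 1 0 =
            PySem.List.pyGetD (pvCastL (pvDiffs k w)) 0 0 + 1 ∧
          PySem.List.pyGetD w (PySem.List.pyGetD (pvCastL (pvDiffs k w)) 0 0) ' ' =
            PySem.List.pyGetD k (PySem.List.pyGetD (pvCastL (pvDiffs k w)) 1 0) ' ' ∧
          PySem.List.pyGetD w (PySem.List.pyGetD (pvCastL (pvDiffs k w)) 1 0) ' ' =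
            PySem.List.pyGetD k (PySem.List.pyGetD (pvCastL (pvDiffs k w)) 0 0) ' ') ↔
        ((pvDiffs k w).length = 2 ∧
          (pvDiffs k w).getD 1 0 = (pvDiffs k w).getD 0 0 + 1 ∧
          w.getD ((pvDiffs k w).getD 0 0) ' ' = k.getD ((pvDiffs k w).getD 1 0) ' ' ∧
          w.getD ((pvDiffs k w).getD 1 0) ' ' = k.getD ((pvDiffs k w).getD 0 0) ' ') := by
      rw [h0, h1, pvCastL_length, PySem.List.pyGetD_natCast, PySem.List.pyGetD_natCast,
        PySem.List.pyGetD_natCast, PySem.List.pyGetD_natCast]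
      constructor
      · rintro ⟨a, b, c, d⟩
        exact ⟨a, by exact_mod_cast b, c, d⟩
      · rintro ⟨a, b, c, d⟩
        exact ⟨a, by exact_mod_cast b, c, d⟩
    by_cases hc : ∃ i : Nat, i + 1 < k.length ∧ pvNatSwap w i = k
    · rw [if_pos (hA.mpr hc), if_pos (hB.mpr ((pvCond_iff_swap k w hlen heq).mpr hc))]
    · rw [if_neg (fun h => hc (hA.mp h)),
        if_neg (fun h => hc ((pvCond_iff_swap k w hlen heq).mp (hB.mp h)))]

-- length of a full window slice
theorem pvSlice_length (t : List Char) (l m : Int) (h0 : 0 ≤ l) (hm : 0 ≤ m)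
    (hend : l + m ≤ (t.length : Int)) :
    (PySem.List.slice t (some l) (some (l + m))).length = m.toNat := by
  rw [PySem.List.slice_toNat _ h0 (by omega)]
  simp only [List.length_take, List.length_drop]
  omega

-- ===== VERDICT (by name: the statement is the Claim_ definition above) =====
theorem similarTextSubstringCount_spec : Claim_equal_similarTextSubstringCount := by
  intro key text _
  unfold Spec_similarTextSubstringCount similarTextSubstringCount similarTextSubstringCount_alt
  simp only []
  apply PySem.List.foldl_congr_mem
  intro acc l hl
  have hl' := (PySem.List.mem_pyRange_one).mp hl
  have hw : (PySem.List.slice text.toList (some l) (some (l + (key.toList.length : Int)))).length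
      = key.toList.length := by
    rw [pvSlice_length _ _ _ hl'.1 (by positivity) (by omega)]
    omega
  exact pvWindow_eq key.toList _ hw acc
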